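-- pv_equiv track=rewrite | github.com/ajayspersonalacc1-beep/ADEA-hackathon | adea/agents/optimization_agent.py | _latest_failure_query
-- ===== SOURCE A (Python) =====
-- def _latest_failure_query(execution_logs: list[str]) -> str:
--     """Return the SQL query associated with the most recent failure."""
--
--     failure_index = None
--     for index in range(len(execution_logs) - 1, -1, -1):
--         if "pipeline execution failed" in execution_logs[index].lower():
--             failure_index = index
--             break
--
--     if failure_index is None:
--         return ""
--
--     for index in range(failure_index - 1, -1, -1):
--         log = execution_logs[index]
--         if "SQL Query: " in log:
--             return log.split("SQL Query: ", maxsplit=1)[1].strip()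
--
--     return ""
-- ===== SOURCE B (Python) =====
-- def _latest_failure_query(execution_logs: list[str]) -> str:
--     """Return the SQL query associated with the most recent failure."""
--     last_sql = ""
--     result = ""
--     for line in execution_logs:
--         if "pipeline execution failed" in line.lower():
--             result = last_sql
--         if "SQL Query: " in line:
--             last_sql = line.split("SQL Query: ", maxsplit=1)[1].strip()
--     return result
-- ===== Notes on version B (the rewrite author's own statement) =====
-- stated objective: simpler
-- what changed: Replaces the two backward index scans (find last failure, then scan back for the preceding SQL line) with a single forward pass that maintains the most recent extracted SQL query and records it whenever a failure line is seen.
import Mathlib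
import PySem

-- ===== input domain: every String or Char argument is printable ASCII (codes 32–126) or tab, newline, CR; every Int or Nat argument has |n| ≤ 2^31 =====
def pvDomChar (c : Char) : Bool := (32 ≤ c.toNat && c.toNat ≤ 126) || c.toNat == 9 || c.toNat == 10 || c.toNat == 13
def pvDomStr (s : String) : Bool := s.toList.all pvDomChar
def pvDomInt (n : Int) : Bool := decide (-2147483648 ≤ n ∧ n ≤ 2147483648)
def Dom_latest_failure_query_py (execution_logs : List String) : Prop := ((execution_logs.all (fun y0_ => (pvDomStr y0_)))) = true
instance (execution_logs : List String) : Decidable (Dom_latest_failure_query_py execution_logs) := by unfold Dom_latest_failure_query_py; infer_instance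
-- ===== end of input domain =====

-- B replaces A's two backward index scans by a single forward accumulating pass (simpler decomposition; same cost).

-- shared by both ports: log.split("SQL Query: ", maxsplit=1)[1].strip() (identical expression in both Pythons)
def pvExtract (log : String) : String :=
  PySem.Str.strip (PySem.List.pyGetD ((PySem.Str.splitMax? log "SQL Query: " 1).getD []) 1 "")

-- ===== PORT A =====
-- first backward loop with break: scan the countdown index list for the most recent failure line
def pvFindFail (xs : List String) : List Int → Option Int
  | [] => none
  | i :: rest =>
    if PySem.Str.isIn "pipeline execution failed" (PySem.Str.lower (PySem.List.pyGetD xs i "")) then some i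
    else pvFindFail xs rest

-- second backward loop with early return: first SQL line strictly before the failure index
def pvFindSql (xs : List String) : List Int → String
  | [] => ""
  | i :: rest =>
    let log := PySem.List.pyGetD xs i ""
    if PySem.Str.isIn "SQL Query: " log then pvExtract log
    else pvFindSql xs rest

def latest_failure_query_py (execution_logs : List String) : String :=
  match pvFindFail execution_logs (PySem.List.pyRange ((execution_logs.length : Int) - 1) (-1) (-1)) with
  | none => ""
  | some failure_index => pvFindSql execution_logs (PySem.List.pyRange (failure_index - 1) (-1) (-1))

-- ===== PORT B =====
def latest_failure_query_py_alt (execution_logs : List String) : String :=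
  (execution_logs.foldl
    (fun (st : String × String) line =>
      let result := if PySem.Str.isIn "pipeline execution failed" (PySem.Str.lower line) then st.1 else st.2
      let last_sql := if PySem.Str.isIn "SQL Query: " line then pvExtract line else st.1
      (last_sql, result))
    ("", "")).2

-- ===== PRECONDITION & SPEC =====
def Spec_latest_failure_query_py (execution_logs : List String) (out : String) : Prop := out = latest_failure_query_py_alt execution_logs
instance (execution_logs : List String) (out : String) : Decidable (Spec_latest_failure_query_py execution_logs out) := by unfold Spec_latest_failure_query_py; infer_instance

-- ===== CLAIM (what is proved, stated in full; the proofs are below) =====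
def Claim_equal_latest_failure_query_py : Prop := ∀ (execution_logs : List String), Dom_latest_failure_query_py execution_logs → Spec_latest_failure_query_py execution_logs (latest_failure_query_py execution_logs)

-- ===== LEMMAS AND PROOFS =====

-- proof-side reverse-form characterisation of A
def pvSqlOf : List String → String
  | [] => ""
  | y :: t => if PySem.Str.isIn "SQL Query: " y then pvExtract y else pvSqlOf t

def pvRevA : List String → String
  | [] => ""
  | y :: t => if PySem.Str.isIn "pipeline execution failed" (PySem.Str.lower y) then pvSqlOf t else pvRevA t

lemma pvFindFail_mem {xs : List String} {l : List Int} {i : Int}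
    (h : pvFindFail xs l = some i) : i ∈ l := by
  induction l with
  | nil => simp [pvFindFail] at h
  | cons a t ih =>
    rw [pvFindFail] at h
    split_ifs at h with hc
    · simp at h; simp [h]
    · exact List.mem_cons_of_mem _ (ih h)

lemma pvGetD_append {xs ex : List String} {i : Int} (h0 : 0 ≤ i) (h1 : i < (xs.length : Int)) :
    PySem.List.pyGetD (xs ++ ex) i "" = PySem.List.pyGetD xs i "" := by
  obtain ⟨k, rfl⟩ := Int.eq_ofNat_of_zero_le h0
  have h1' : k < xs.length := by exact_mod_cast h1
  rw [PySem.List.pyGetD_natCast, PySem.List.pyGetD_natCast,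
      List.getD_eq_getElem?_getD, List.getD_eq_getElem?_getD,
      List.getElem?_append_left h1']

lemma pvFindFail_append {xs ex : List String} {l : List Int}
    (h : ∀ i ∈ l, 0 ≤ i ∧ i < (xs.length : Int)) :
    pvFindFail (xs ++ ex) l = pvFindFail xs l := by
  induction l with
  | nil => rfl
  | cons a t ih =>
    have ha := h a (List.mem_cons_self)
    rw [pvFindFail, pvFindFail, pvGetD_append ha.1 ha.2,
        ih (fun i hi => h i (List.mem_cons_of_mem _ hi))]

lemma pvFindSql_append {xs ex : List String} {l : List Int}
    (h : ∀ i ∈ l, 0 ≤ i ∧ i < (xs.length : Int)) :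
    pvFindSql (xs ++ ex) l = pvFindSql xs l := by
  induction l with
  | nil => rfl
  | cons a t ih =>
    have ha := h a (List.mem_cons_self)
    rw [pvFindSql, pvFindSql, pvGetD_append ha.1 ha.2,
        ih (fun i hi => h i (List.mem_cons_of_mem _ hi))]

lemma pvFindSql_range (xs : List String) : ∀ ex : List String,
    pvFindSql (xs ++ ex) (PySem.List.pyRange ((xs.length : Int) - 1) (-1) (-1)) = pvSqlOf xs.reverse := by
  induction xs using List.reverseRecOn with
  | nil =>
    intro ex
    simp [pvFindSql, pvSqlOf]
  | append_singleton ys y ih =>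
    intro ex
    have hlen : ((ys ++ [y]).length : Int) - 1 = (ys.length : Int) := by simp
    rw [hlen, PySem.List.pyRange_neg_one_cons (by omega : (-1:Int) < (ys.length : Int))]
    rw [pvFindSql]
    have hget : PySem.List.pyGetD ((ys ++ [y]) ++ ex) (ys.length : Int) "" = y := by
      rw [pvGetD_append (by omega) (by simp), PySem.List.pyGetD_natCast]
      simp
    rw [hget]
    simp only [List.reverse_append, List.reverse_singleton, List.singleton_append, pvSqlOf]
    split_ifs with hc
    · rfl
    · rw [List.append_assoc]
      exact ih ([y] ++ ex)

lemma pvA_eq_revA (xs : List String) : latest_failure_query_py xs = pvRevA xs.reverse := by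
  induction xs using List.reverseRecOn with
  | nil =>
    simp [latest_failure_query_py, pvFindFail, pvRevA]
  | append_singleton ys y ih =>
    rw [latest_failure_query_py]
    have hlen : (((ys ++ [y]).length : Int)) - 1 = (ys.length : Int) := by simp
    rw [hlen, PySem.List.pyRange_neg_one_cons (by omega : (-1:Int) < (ys.length : Int))]
    have hget : PySem.List.pyGetD (ys ++ [y]) (ys.length : Int) "" = y := by
      rw [PySem.List.pyGetD_natCast]; simp
    rw [pvFindFail, hget]
    simp only [List.reverse_append, List.reverse_singleton, List.singleton_append, pvRevA]
    split_ifs with hc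
    · exact pvFindSql_range ys [y]
    · have hmem : ∀ i ∈ PySem.List.pyRange ((ys.length : Int) - 1) (-1) (-1),
          0 ≤ i ∧ i < (ys.length : Int) := by
        intro i hi
        rw [PySem.List.mem_pyRange_neg_one] at hi
        omega
      rw [pvFindFail_append hmem]
      rw [latest_failure_query_py] at ih
      rcases hfa : pvFindFail ys (PySem.List.pyRange ((ys.length : Int) - 1) (-1) (-1)) with _ | fi
      · rw [hfa] at ih; exact ih
      · rw [hfa] at ih
        have hfi := pvFindFail_mem hfa
        rw [PySem.List.mem_pyRange_neg_one] at hfi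
        have hmem2 : ∀ i ∈ PySem.List.pyRange (fi - 1) (-1) (-1),
            0 ≤ i ∧ i < (ys.length : Int) := by
          intro i hi
          rw [PySem.List.mem_pyRange_neg_one] at hi
          omega
        show pvFindSql (ys ++ [y]) (PySem.List.pyRange (fi - 1) (-1) (-1)) = pvRevA ys.reverse
        rw [pvFindSql_append hmem2]
        exact ih

lemma pvB_state (xs : List String) :
    xs.foldl
      (fun (st : String × String) line =>
        let result := if PySem.Str.isIn "pipeline execution failed" (PySem.Str.lower line) then st.1 else st.2
        let last_sql := if PySem.Str.isIn "SQL Query: " line then pvExtract line else st.1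
        (last_sql, result))
      ("", "") = (pvSqlOf xs.reverse, pvRevA xs.reverse) := by
  induction xs using List.reverseRecOn with
  | nil => simp [pvSqlOf, pvRevA]
  | append_singleton ys y ih =>
    rw [List.foldl_append, ih]
    simp only [List.foldl_cons, List.foldl_nil, List.reverse_append, List.reverse_singleton,
      List.singleton_append, pvSqlOf, pvRevA]

-- ===== VERDICT (by name: the statement is the Claim_ definition above) =====
theorem latest_failure_query_py_spec : Claim_equal_latest_failure_query_py := by
  intro xs _
  unfold Spec_latest_failure_query_py latest_failure_query_py_alt
  rw [pvB_state, pvA_eq_revA]
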